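-- pv_equiv track=rewrite | github.com/jianershi/algorithm | 1861.py | ratJump
-- ===== SOURCE A (Python) =====
-- class DataType:
--     ODD = 1
--     EVEN = 0
--
-- def ratJump(arr):
--     # Write your code here.
--     MOD = int(1e9 + 7)
--     if not arr:
--         return 0
--     n = len(arr)
--     odd_steps = [1, 2, 4]
--     even_steps = [1, 3, 4]
--
--
--     dp = [[0] * 2 for _ in range(n)]
--
--     dp[0][DataType.ODD] = 1
--
--     for i in range(n - 1): #n = 3, 0, 1, 2, at n - 1, it is already at ground, so cannot jump, so last number is n -2
--         for j in range(3):
--             if i + even_steps[j] > n - 1 or arr[i + even_steps[j]] == 0: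
--                 dp[min(i + even_steps[j], n - 1)][DataType.ODD] += dp[i][DataType.EVEN] % MOD
--             if i + odd_steps[j] > n - 1 or arr[i + odd_steps[j]] == 0:
--                 dp[min(i + odd_steps[j], n - 1)][DataType.EVEN] += dp[i][DataType.ODD] % MOD
--
--     return sum(dp[n - 1]) % MOD
-- ===== SOURCE B (Python) =====
-- def ratJump(arr):
--     # Backward DP: rows[j] = (ways to finish from position n-1-j with parity EVEN,
--     # ways with parity ODD), built from the last cell toward the front; answer is
--     # the ODD entry of position 0.  A jump of s from i lands past the end (counts
--     # as one way) or on a zero cell (continue with flipped parity).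
--     MOD = 10**9 + 7
--     if not arr:
--         return 0
--     n = len(arr)
--     rows = [(1, 1)]  # position n-1: already at the goal
--     for i in range(n - 2, -1, -1):
--         we = 0  # from (i, EVEN), steps 1,3,4, landing parity ODD
--         for s in (1, 3, 4):
--             if i + s > n - 1:
--                 we += 1
--             elif arr[i + s] == 0:
--                 we += rows[len(rows) - s][1]
--         wo = 0  # from (i, ODD), steps 1,2,4, landing parity EVEN
--         for s in (1, 2, 4):
--             if i + s > n - 1:
--                 wo += 1
--             elif arr[i + s] == 0:
--                 wo += rows[len(rows) - s][0]
--         rows.append((we % MOD, wo % MOD))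
--     return rows[len(rows) - 1][1]
-- ===== Notes on version B (the rewrite author's own statement) =====
-- stated objective: alternative
-- what changed: Replaces A's forward push-DP (propagating arrival counts from each cell to its successors in a 2-column table, summing the last row) by a backward dynamic program: ways-to-finish f(i,parity) computed from the last cell toward the front, with the goal clamp contributing 1 directly; answer is f(0,ODD).
import Mathlib
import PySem

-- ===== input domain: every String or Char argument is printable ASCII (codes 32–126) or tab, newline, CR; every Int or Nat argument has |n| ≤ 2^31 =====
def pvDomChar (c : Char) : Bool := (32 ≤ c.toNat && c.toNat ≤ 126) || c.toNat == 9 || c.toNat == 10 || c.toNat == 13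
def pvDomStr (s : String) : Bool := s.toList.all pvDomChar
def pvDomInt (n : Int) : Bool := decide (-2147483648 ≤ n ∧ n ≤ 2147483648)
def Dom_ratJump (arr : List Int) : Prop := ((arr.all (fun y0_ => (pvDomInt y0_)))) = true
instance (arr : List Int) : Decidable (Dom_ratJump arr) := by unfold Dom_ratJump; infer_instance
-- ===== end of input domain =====

-- B replaces A's forward push-DP over a 2-column table by a backward ways-to-finish DP
-- built from the last cell toward the front (alternative decomposition, same O(n) cost).


-- ===== PORT A =====
def pvMOD : Int := 1000000007   -- int(1e9 + 7)

-- Python dp rows are 2-element lists [EVEN, ODD]; they are ported as pairs (fst = EVEN slot, snd = ODD slot).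
-- Body of A's inner loop over j: two conditional in-place updates of dp.
-- Python's short-circuit `or`: arr[i+step] is only read when i+step ≤ n-1, so the total
-- `List.getD` (default never used there) is exact.
def pvAInnerEven (arr : List Int) (n i : ℕ) (dp : List (Int × Int)) (j : ℕ) : List (Int × Int) :=
  if i + ([1, 3, 4] : List ℕ).getD j 0 > n - 1 ∨ arr.getD (i + ([1, 3, 4] : List ℕ).getD j 0) 0 = 0 then
    dp.modify (min (i + ([1, 3, 4] : List ℕ).getD j 0) (n - 1))
      (fun r => (r.1, r.2 + PySem.Int.mod (dp.getD i (0, 0)).1 pvMOD))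
  else dp

def pvAInnerOdd (arr : List Int) (n i : ℕ) (dp : List (Int × Int)) (j : ℕ) : List (Int × Int) :=
  if i + ([1, 2, 4] : List ℕ).getD j 0 > n - 1 ∨ arr.getD (i + ([1, 2, 4] : List ℕ).getD j 0) 0 = 0 then
    dp.modify (min (i + ([1, 2, 4] : List ℕ).getD j 0) (n - 1))
      (fun r => (r.1 + PySem.Int.mod (dp.getD i (0, 0)).2 pvMOD, r.2))
  else dp

-- the two conditional updates of A's inner loop body, in Python's order
def pvAInner (arr : List Int) (n i : ℕ) (dp : List (Int × Int)) (j : ℕ) : List (Int × Int) :=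
  pvAInnerOdd arr n i (pvAInnerEven arr n i dp j) j

def ratJump (arr : List Int) : Int :=
  if arr = [] then 0
  else
    let n := arr.length
    let dp0 : List (Int × Int) := (List.replicate n ((0 : Int), (0 : Int))).set 0 (0, 1)
    let dp := (List.range (n - 1)).foldl (fun dp i => (List.range 3).foldl (pvAInner arr n i) dp) dp0
    PySem.Int.mod ((dp.getD (n - 1) (0, 0)).1 + (dp.getD (n - 1) (0, 0)).2) pvMOD

-- ===== PORT B =====
-- B keeps `rows`, rows[j] = (ways to finish from position n-1-j with parity EVEN, … ODD),
-- appended back-to-front; rows[len(rows)-s] is Python's rows[len(rows)-s] (in range whenever read).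
def pvBStep (arr : List Int) (n : ℕ) (rows : List (Int × Int)) (i : ℕ) : List (Int × Int) :=
  let we := PySem.Int.mod (([1, 3, 4] : List ℕ).foldl (fun t s =>
      if i + s > n - 1 then t + 1
      else if arr.getD (i + s) 0 = 0 then t + (rows.getD (rows.length - s) (0, 0)).2
      else t) 0) pvMOD
  let wo := PySem.Int.mod (([1, 2, 4] : List ℕ).foldl (fun t s =>
      if i + s > n - 1 then t + 1
      else if arr.getD (i + s) 0 = 0 then t + (rows.getD (rows.length - s) (0, 0)).1
      else t) 0) pvMOD
  rows ++ [(we, wo)]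

def ratJump_alt (arr : List Int) : Int :=
  if arr = [] then 0
  else
    let n := arr.length
    -- for i in range(n-2, -1, -1): the descending range is [n-2, …, 0] = (range (n-1)).reverse
    let rows := ((List.range (n - 1)).reverse).foldl (pvBStep arr n) [((1 : Int), (1 : Int))]
    (rows.getD (rows.length - 1) (0, 0)).2

-- ===== PRECONDITION & SPEC =====
def Spec_ratJump (arr : List Int) (out : Int) : Prop := out = ratJump_alt arr
instance (arr : List Int) (out : Int) : Decidable (Spec_ratJump arr out) := by unfold Spec_ratJump; infer_instance

-- ===== CLAIM (what is proved, stated in full; the proofs are below) =====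
def Claim_equal_ratJump : Prop := ∀ (arr : List Int), Dom_ratJump arr → Spec_ratJump arr (ratJump arr)

-- ===== LEMMAS AND PROOFS =====

-- Exact ways-to-finish count (no modular reduction): from position i with parity p (true = ODD),
-- a step s of the current parity finishes directly past the end, or continues from a zero cell.
def pvF (arr : List Int) (i : ℕ) (p : Bool) : Int :=
  if _h : arr.length - 1 ≤ i then 1
  else
    (if i + 1 > arr.length - 1 then 1 else if arr.getD (i + 1) 0 = 0 then pvF arr (i + 1) (!p) else 0)
    + (if i + (if p then 2 else 3) > arr.length - 1 then 1
       else if arr.getD (i + (if p then 2 else 3)) 0 = 0 then pvF arr (i + (if p then 2 else 3)) (!p) else 0)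
    + (if i + 4 > arr.length - 1 then 1 else if arr.getD (i + 4) 0 = 0 then pvF arr (i + 4) (!p) else 0)
termination_by arr.length - i
decreasing_by all_goals (cases p <;> simp_all <;> omega)

-- one jump option of size s, continuing with parity q
def pvJump (arr : List Int) (i s : ℕ) (q : Bool) : Int :=
  if i + s > arr.length - 1 then 1
  else if arr.getD (i + s) 0 = 0 then pvF arr (i + s) q else 0

lemma pvF_base (arr : List Int) (i : ℕ) (p : Bool) (h : arr.length - 1 ≤ i) : pvF arr i p = 1 := by
  rw [pvF]; simp [h]

lemma pvF_eq (arr : List Int) (i : ℕ) (p : Bool) (h : i < arr.length - 1) :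
    pvF arr i p = pvJump arr i 1 (!p) + pvJump arr i (if p then 2 else 3) (!p) + pvJump arr i 4 (!p) := by
  rw [pvF]; simp only [pvJump]; rw [dif_neg (by omega)]

lemma pvF_mod_modeq (arr : List Int) (i : ℕ) (p : Bool) :
    Int.ModEq pvMOD (pvF arr i p % pvMOD) (pvF arr i p) :=
  Int.emod_emod_of_dvd _ dvd_rfl

lemma pvMOD_pos : (0 : Int) < pvMOD := by norm_num [pvMOD]

lemma pv_if_add (t x : Int) (c d : Prop) [Decidable c] [Decidable d] :
    (if c then t + 1 else if d then t + x else t) = t + (if c then 1 else if d then x else 0) := by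
  split_ifs <;> ring

-- ---------- A-side: bilinear invariant ----------

def pvSlot (dp : List (Int × Int)) (k : ℕ) (p : Bool) : Int :=
  if p then (dp.getD k (0, 0)).2 else (dp.getD k (0, 0)).1

def pvPhi (arr : List Int) (dp : List (Int × Int)) (m : ℕ) : Int :=
  ∑ k ∈ Finset.Ico m arr.length, (pvSlot dp k false * pvF arr k false + pvSlot dp k true * pvF arr k true)

lemma pv_getD_modify_ne {l : List (Int × Int)} {t j : ℕ} (f : Int × Int → Int × Int) (h : t ≠ j) :
    (l.modify t f).getD j (0, 0) = l.getD j (0, 0) := by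
  simp [List.getD_eq_getElem?_getD, List.getElem?_modify, h]

lemma pv_getD_modify_self {l : List (Int × Int)} {t : ℕ} (f : Int × Int → Int × Int) (h : t < l.length) :
    (l.modify t f).getD t (0, 0) = f (l.getD t (0, 0)) := by
  rcases List.getElem?_eq_some_iff.2 ⟨h, rfl⟩ with hg
  simp [List.getD_eq_getElem?_getD, List.getElem?_modify, List.getElem?_eq_getElem h]

lemma pvSlot_modify_ne {l : List (Int × Int)} {t j : ℕ} (f : Int × Int → Int × Int) (h : t ≠ j) (q : Bool) :
    pvSlot (l.modify t f) j q = pvSlot l j q := by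
  unfold pvSlot; rw [pv_getD_modify_ne f h]

lemma pvPhi_modify_true (arr : List Int) (dp : List (Int × Int)) (m t : ℕ) (x : Int)
    (hlen : dp.length = arr.length) (hm : m ≤ t) (ht : t < arr.length) :
    pvPhi arr (dp.modify t (fun r => (r.1, r.2 + x))) m = pvPhi arr dp m + x * pvF arr t true := by
  unfold pvPhi
  have hmem : t ∈ Finset.Ico m arr.length := Finset.mem_Ico.2 ⟨hm, ht⟩
  rw [show (∑ k ∈ Finset.Ico m arr.length,
      (pvSlot (dp.modify t (fun r => (r.1, r.2 + x))) k false * pvF arr k false +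
       pvSlot (dp.modify t (fun r => (r.1, r.2 + x))) k true * pvF arr k true))
    = ∑ k ∈ Finset.Ico m arr.length,
      ((pvSlot dp k false * pvF arr k false + pvSlot dp k true * pvF arr k true) +
        (if k = t then x * pvF arr t true else 0)) from
    Finset.sum_congr rfl (by
      intro k _
      by_cases hk : k = t
      · subst hk
        simp only [pvSlot, pv_getD_modify_self _ (hlen ▸ ht)]
        simp; ring
      · rw [pvSlot_modify_ne _ (fun h => hk h.symm), pvSlot_modify_ne _ (fun h => hk h.symm), if_neg hk]
        ring)]
  rw [Finset.sum_add_distrib, Finset.sum_ite_eq' _ t _, if_pos hmem]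

lemma pvPhi_modify_false (arr : List Int) (dp : List (Int × Int)) (m t : ℕ) (x : Int)
    (hlen : dp.length = arr.length) (hm : m ≤ t) (ht : t < arr.length) :
    pvPhi arr (dp.modify t (fun r => (r.1 + x, r.2))) m = pvPhi arr dp m + x * pvF arr t false := by
  unfold pvPhi
  have hmem : t ∈ Finset.Ico m arr.length := Finset.mem_Ico.2 ⟨hm, ht⟩
  rw [show (∑ k ∈ Finset.Ico m arr.length,
      (pvSlot (dp.modify t (fun r => (r.1 + x, r.2))) k false * pvF arr k false +
       pvSlot (dp.modify t (fun r => (r.1 + x, r.2))) k true * pvF arr k true))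
    = ∑ k ∈ Finset.Ico m arr.length,
      ((pvSlot dp k false * pvF arr k false + pvSlot dp k true * pvF arr k true) +
        (if k = t then x * pvF arr t false else 0)) from
    Finset.sum_congr rfl (by
      intro k _
      by_cases hk : k = t
      · subst hk
        simp only [pvSlot, pv_getD_modify_self _ (hlen ▸ ht)]
        simp; ring
      · rw [pvSlot_modify_ne _ (fun h => hk h.symm), pvSlot_modify_ne _ (fun h => hk h.symm), if_neg hk]
        ring)]
  rw [Finset.sum_add_distrib, Finset.sum_ite_eq' _ t _, if_pos hmem]

-- one conditional update of A's inner body adds x * (one pvJump term) to the invariant sum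
lemma pvAInnerEven_spec (arr : List Int) (i j : ℕ) (dp : List (Int × Int))
    (hi : i < arr.length - 1) (hlen : dp.length = arr.length)
    (he : 1 ≤ ([1, 3, 4] : List ℕ).getD j 0) :
    (pvAInnerEven arr arr.length i dp j).length = arr.length ∧
    (∀ q, pvSlot (pvAInnerEven arr arr.length i dp j) i q = pvSlot dp i q) ∧
    pvPhi arr (pvAInnerEven arr arr.length i dp j) (i + 1)
      = pvPhi arr dp (i + 1)
        + (pvSlot dp i false % pvMOD) * pvJump arr i (([1, 3, 4] : List ℕ).getD j 0) true := by
  set e := ([1, 3, 4] : List ℕ).getD j 0 with hedef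
  unfold pvAInnerEven
  rw [← hedef]
  by_cases hc : i + e > arr.length - 1 ∨ arr.getD (i + e) 0 = 0
  · rw [if_pos hc]
    have ht : min (i + e) (arr.length - 1) < arr.length := by omega
    have htm : i + 1 ≤ min (i + e) (arr.length - 1) := by omega
    have hne : min (i + e) (arr.length - 1) ≠ i := by omega
    refine ⟨by simp [List.length_modify, hlen], fun q => pvSlot_modify_ne _ hne q, ?_⟩
    rw [pvPhi_modify_true arr dp (i + 1) _ _ hlen htm ht]
    congr 1
    rw [PySem.Int.mod_eq_emod_of_pos pvMOD_pos]
    have hx : (dp.getD i ((0 : Int), (0 : Int))).1 = pvSlot dp i false := by simp [pvSlot]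
    rw [hx]
    congr 1
    by_cases hgt : i + e > arr.length - 1
    · rw [show min (i + e) (arr.length - 1) = arr.length - 1 from by omega,
        pvF_base arr _ _ le_rfl]
      unfold pvJump; rw [if_pos hgt]
    · have h0 : arr.getD (i + e) 0 = 0 := hc.resolve_left hgt
      rw [show min (i + e) (arr.length - 1) = i + e from by omega]
      unfold pvJump; rw [if_neg hgt, if_pos h0]
  · rw [if_neg hc]
    refine ⟨hlen, fun q => rfl, ?_⟩
    unfold pvJump
    rw [if_neg (fun hA => hc (Or.inl hA)), if_neg (fun hB => hc (Or.inr hB))]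
    ring

lemma pvAInnerOdd_spec (arr : List Int) (i j : ℕ) (dp : List (Int × Int))
    (hi : i < arr.length - 1) (hlen : dp.length = arr.length)
    (ho : 1 ≤ ([1, 2, 4] : List ℕ).getD j 0) :
    (pvAInnerOdd arr arr.length i dp j).length = arr.length ∧
    (∀ q, pvSlot (pvAInnerOdd arr arr.length i dp j) i q = pvSlot dp i q) ∧
    pvPhi arr (pvAInnerOdd arr arr.length i dp j) (i + 1)
      = pvPhi arr dp (i + 1)
        + (pvSlot dp i true % pvMOD) * pvJump arr i (([1, 2, 4] : List ℕ).getD j 0) false := by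
  set o := ([1, 2, 4] : List ℕ).getD j 0 with hodef
  unfold pvAInnerOdd
  rw [← hodef]
  by_cases hc : i + o > arr.length - 1 ∨ arr.getD (i + o) 0 = 0
  · rw [if_pos hc]
    have ht : min (i + o) (arr.length - 1) < arr.length := by omega
    have htm : i + 1 ≤ min (i + o) (arr.length - 1) := by omega
    have hne : min (i + o) (arr.length - 1) ≠ i := by omega
    refine ⟨by simp [List.length_modify, hlen], fun q => pvSlot_modify_ne _ hne q, ?_⟩
    rw [pvPhi_modify_false arr dp (i + 1) _ _ hlen htm ht]
    congr 1
    rw [PySem.Int.mod_eq_emod_of_pos pvMOD_pos]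
    have hx : (dp.getD i ((0 : Int), (0 : Int))).2 = pvSlot dp i true := by simp [pvSlot]
    rw [hx]
    congr 1
    by_cases hgt : i + o > arr.length - 1
    · rw [show min (i + o) (arr.length - 1) = arr.length - 1 from by omega,
        pvF_base arr _ _ le_rfl]
      unfold pvJump; rw [if_pos hgt]
    · have h0 : arr.getD (i + o) 0 = 0 := hc.resolve_left hgt
      rw [show min (i + o) (arr.length - 1) = i + o from by omega]
      unfold pvJump; rw [if_neg hgt, if_pos h0]
  · rw [if_neg hc]
    refine ⟨hlen, fun q => rfl, ?_⟩
    unfold pvJump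
    rw [if_neg (fun hA => hc (Or.inl hA)), if_neg (fun hB => hc (Or.inr hB))]
    ring

lemma pvAInner_spec (arr : List Int) (i j : ℕ) (dp : List (Int × Int))
    (hi : i < arr.length - 1) (hlen : dp.length = arr.length)
    (he : 1 ≤ ([1, 3, 4] : List ℕ).getD j 0) (ho : 1 ≤ ([1, 2, 4] : List ℕ).getD j 0) :
    (pvAInner arr arr.length i dp j).length = arr.length ∧
    (∀ q, pvSlot (pvAInner arr arr.length i dp j) i q = pvSlot dp i q) ∧
    pvPhi arr (pvAInner arr arr.length i dp j) (i + 1)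
      = pvPhi arr dp (i + 1)
        + (pvSlot dp i false % pvMOD) * pvJump arr i (([1, 3, 4] : List ℕ).getD j 0) true
        + (pvSlot dp i true % pvMOD) * pvJump arr i (([1, 2, 4] : List ℕ).getD j 0) false := by
  obtain ⟨l1, s1, p1⟩ := pvAInnerEven_spec arr i j dp hi hlen he
  obtain ⟨l2, s2, p2⟩ := pvAInnerOdd_spec arr i j _ hi l1 ho
  unfold pvAInner
  exact ⟨l2, fun q => (s2 q).trans (s1 q), by rw [p2, p1, s1 true]⟩

-- one full iteration of A's outer loop, as an invariant step
lemma pvAStep_spec (arr : List Int) (k : ℕ) (dp : List (Int × Int))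
    (hk : k < arr.length - 1) (hlen : dp.length = arr.length) :
    ((List.range 3).foldl (pvAInner arr arr.length k) dp).length = arr.length ∧
    Int.ModEq pvMOD (pvPhi arr ((List.range 3).foldl (pvAInner arr arr.length k) dp) (k + 1))
      (pvPhi arr dp k) := by
  obtain ⟨l0, s0, p0⟩ := pvAInner_spec arr k 0 dp hk hlen (by norm_num) (by norm_num)
  obtain ⟨l1, s1, p1⟩ := pvAInner_spec arr k 1 _ hk l0 (by norm_num) (by norm_num)
  obtain ⟨l2, s2, p2⟩ := pvAInner_spec arr k 2 _ hk l1 (by norm_num) (by norm_num)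
  have hfold : (List.range 3).foldl (pvAInner arr arr.length k) dp
      = pvAInner arr arr.length k (pvAInner arr arr.length k (pvAInner arr arr.length k dp 0) 1) 2 := by
    rw [show List.range 3 = [0, 1, 2] from by decide]
    rfl
  rw [hfold]
  refine ⟨by rw [← hfold]; exact l2, ?_⟩
  rw [p2, p1, p0, s1 true, s1 false, s0 true, s0 false]
  have hsplit : pvPhi arr dp k
      = (pvSlot dp k false * pvF arr k false + pvSlot dp k true * pvF arr k true) + pvPhi arr dp (k + 1) := by
    unfold pvPhi
    rw [Finset.sum_eq_sum_Ico_succ_bot (show k < arr.length from by omega)]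
  have hFf : pvF arr k false
      = pvJump arr k 1 true + pvJump arr k 3 true + pvJump arr k 4 true := by
    rw [pvF_eq arr k false hk]; norm_num
  have hFt : pvF arr k true
      = pvJump arr k 1 false + pvJump arr k 2 false + pvJump arr k 4 false := by
    rw [pvF_eq arr k true hk]; norm_num
  have hL : pvPhi arr dp (k + 1)
        + (pvSlot dp k false % pvMOD) * pvJump arr k (([1,3,4] : List ℕ).getD 0 0) true
        + (pvSlot dp k true % pvMOD) * pvJump arr k (([1,2,4] : List ℕ).getD 0 0) false
        + (pvSlot dp k false % pvMOD) * pvJump arr k (([1,3,4] : List ℕ).getD 1 0) true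
        + (pvSlot dp k true % pvMOD) * pvJump arr k (([1,2,4] : List ℕ).getD 1 0) false
        + (pvSlot dp k false % pvMOD) * pvJump arr k (([1,3,4] : List ℕ).getD 2 0) true
        + (pvSlot dp k true % pvMOD) * pvJump arr k (([1,2,4] : List ℕ).getD 2 0) false
      = pvPhi arr dp (k + 1)
        + (pvSlot dp k false % pvMOD) * pvF arr k false
        + (pvSlot dp k true % pvMOD) * pvF arr k true := by
    rw [hFf, hFt]
    norm_num
    ring
  rw [hL, hsplit]
  have hmf : Int.ModEq pvMOD (pvSlot dp k false % pvMOD) (pvSlot dp k false) :=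
    Int.emod_emod_of_dvd _ dvd_rfl
  have hmt : Int.ModEq pvMOD (pvSlot dp k true % pvMOD) (pvSlot dp k true) :=
    Int.emod_emod_of_dvd _ dvd_rfl
  calc pvPhi arr dp (k + 1) + (pvSlot dp k false % pvMOD) * pvF arr k false
          + (pvSlot dp k true % pvMOD) * pvF arr k true
      ≡ pvPhi arr dp (k + 1) + pvSlot dp k false * pvF arr k false
          + pvSlot dp k true * pvF arr k true [ZMOD pvMOD] :=
        ((Int.ModEq.refl _).add (hmf.mul_right _)).add (hmt.mul_right _)
    _ = (pvSlot dp k false * pvF arr k false + pvSlot dp k true * pvF arr k true) + pvPhi arr dp (k + 1) := by ring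

lemma pvPhi_init (arr : List Int) (h : arr ≠ []) :
    pvPhi arr ((List.replicate arr.length ((0 : Int), (0 : Int))).set 0 (0, 1)) 0 = pvF arr 0 true := by
  have hn : 0 < arr.length := List.length_pos_iff.2 h
  unfold pvPhi
  rw [show (∑ k ∈ Finset.Ico 0 arr.length,
      (pvSlot ((List.replicate arr.length ((0 : Int), (0 : Int))).set 0 (0, 1)) k false * pvF arr k false +
       pvSlot ((List.replicate arr.length ((0 : Int), (0 : Int))).set 0 (0, 1)) k true * pvF arr k true))
    = ∑ k ∈ Finset.Ico 0 arr.length, (if k = 0 then pvF arr 0 true else 0) from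
    Finset.sum_congr rfl (by
      intro k hk
      have hklt : k < arr.length := (Finset.mem_Ico.1 hk).2
      by_cases hk0 : k = 0
      · subst hk0
        rw [show pvSlot ((List.replicate arr.length ((0 : Int), (0 : Int))).set 0 (0, 1)) 0 false = 0 from by
            simp [pvSlot, List.getD_eq_getElem?_getD, hn],
          show pvSlot ((List.replicate arr.length ((0 : Int), (0 : Int))).set 0 (0, 1)) 0 true = 1 from by
            simp [pvSlot, List.getD_eq_getElem?_getD, hn],
          if_pos rfl]
        ring
      · rw [show ∀ q, pvSlot ((List.replicate arr.length ((0 : Int), (0 : Int))).set 0 (0, 1)) k q = 0 from by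
            intro q
            simp [pvSlot, List.getD_eq_getElem?_getD, hklt, Ne.symm hk0],
          show ∀ q, pvSlot ((List.replicate arr.length ((0 : Int), (0 : Int))).set 0 (0, 1)) k q = 0 from by
            intro q
            simp [pvSlot, List.getD_eq_getElem?_getD, hklt, Ne.symm hk0],
          if_neg hk0]
        ring)]
  rw [Finset.sum_ite_eq' _ 0 _, if_pos (Finset.mem_Ico.2 ⟨le_rfl, hn⟩)]

-- A's outer fold preserves: length = n and Φ ≡ pvF arr 0 true (mod pvMOD)
lemma pv_foldl_range_inv {S : Type} (f : S → ℕ → S) (P : ℕ → S → Prop) (K : ℕ)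
    (h : ∀ k s, k < K → P k s → P (k + 1) (f s k)) :
    ∀ s, P 0 s → P K ((List.range K).foldl f s) := by
  induction K with
  | zero => intro s hs; simpa using hs
  | succ K ih =>
    intro s hs
    rw [List.range_succ, List.foldl_append]
    exact h _ _ (Nat.lt_succ_self K) (ih (fun k s hk => h k s (hk.trans (Nat.lt_succ_self K))) s hs)

lemma ratJump_eq_F (arr : List Int) (h : arr ≠ []) : ratJump arr = pvF arr 0 true % pvMOD := by
  have hn : 0 < arr.length := List.length_pos_iff.2 h
  unfold ratJump
  rw [if_neg h]
  have hinit : ((List.replicate arr.length ((0 : Int), (0 : Int))).set 0 (0, 1)).length = arr.length ∧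
      Int.ModEq pvMOD (pvPhi arr ((List.replicate arr.length ((0 : Int), (0 : Int))).set 0 (0, 1)) 0)
        (pvF arr 0 true) := by
    refine ⟨by simp, ?_⟩
    rw [pvPhi_init arr h]
  have hfin := pv_foldl_range_inv (fun dp i => (List.range 3).foldl (pvAInner arr arr.length i) dp)
    (fun m dp => dp.length = arr.length ∧ Int.ModEq pvMOD (pvPhi arr dp m) (pvF arr 0 true))
    (arr.length - 1)
    (fun k dp hk hP => by
      obtain ⟨hl, hphi⟩ := pvAStep_spec arr k dp hk hP.1
      exact ⟨hl, hphi.trans hP.2⟩)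
    _ hinit
  set dpF := (List.range (arr.length - 1)).foldl
    (fun dp i => (List.range 3).foldl (pvAInner arr arr.length i) dp)
    ((List.replicate arr.length ((0 : Int), (0 : Int))).set 0 (0, 1)) with hdpF
  show PySem.Int.mod ((dpF.getD (arr.length - 1) (0, 0)).1 + (dpF.getD (arr.length - 1) (0, 0)).2) pvMOD
    = pvF arr 0 true % pvMOD
  rw [PySem.Int.mod_eq_emod_of_pos pvMOD_pos]
  have hphi : pvPhi arr dpF (arr.length - 1)
      = (dpF.getD (arr.length - 1) (0, 0)).1 + (dpF.getD (arr.length - 1) (0, 0)).2 := by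
    unfold pvPhi
    rw [show Finset.Ico (arr.length - 1) arr.length = {arr.length - 1} from by
      ext k; simp [Finset.mem_Ico]; omega]
    rw [Finset.sum_singleton, pvF_base arr _ _ le_rfl, pvF_base arr _ _ le_rfl]
    simp [pvSlot]
  rw [← hphi]
  exact hfin.2

-- ---------- B-side: rows cover positions m..n-1 ----------

def pvRow (arr : List Int) (i : ℕ) : Int × Int :=
  (pvF arr i false % pvMOD, pvF arr i true % pvMOD)

def pvCover (arr : List Int) (m : ℕ) (rows : List (Int × Int)) : Prop :=
  rows.length = arr.length - m ∧
  ∀ j, j < rows.length → rows.getD j (0, 0) = pvRow arr (arr.length - 1 - j)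

lemma pv_foldl_revrange_inv {S : Type} (f : S → ℕ → S) (P : ℕ → S → Prop) (K : ℕ)
    (h : ∀ k s, k < K → P (k + 1) s → P k (f s k)) :
    ∀ s, P K s → P 0 (((List.range K).reverse).foldl f s) := by
  induction K with
  | zero => intro s hs; simpa using hs
  | succ K ih =>
    intro s hs
    rw [List.range_succ, List.reverse_append]
    exact ih (fun k s hk => h k s (hk.trans (Nat.lt_succ_self K)))
      _ (h K s (Nat.lt_succ_self K) hs)

lemma pvBTerm2 (arr : List Int) (i s : ℕ) (rows : List (Int × Int))
    (hi : i < arr.length - 1) (hs : 1 ≤ s) (hc : pvCover arr (i + 1) rows) :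
    Int.ModEq pvMOD
      (if i + s > arr.length - 1 then (1 : Int)
       else if arr.getD (i + s) 0 = 0 then (rows.getD (rows.length - s) (0, 0)).2 else 0)
      (pvJump arr i s true) := by
  unfold pvJump
  by_cases hgt : i + s > arr.length - 1
  · rw [if_pos hgt, if_pos hgt]
  · rw [if_neg hgt, if_neg hgt]
    by_cases h0 : arr.getD (i + s) 0 = 0
    · rw [if_pos h0, if_pos h0]
      have hlen := hc.1
      have hjlt : rows.length - s < rows.length := by omega
      rw [hc.2 _ hjlt, show arr.length - 1 - (rows.length - s) = i + s from by omega]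
      exact pvF_mod_modeq arr (i + s) true
    · rw [if_neg h0, if_neg h0]

lemma pvBTerm1 (arr : List Int) (i s : ℕ) (rows : List (Int × Int))
    (hi : i < arr.length - 1) (hs : 1 ≤ s) (hc : pvCover arr (i + 1) rows) :
    Int.ModEq pvMOD
      (if i + s > arr.length - 1 then (1 : Int)
       else if arr.getD (i + s) 0 = 0 then (rows.getD (rows.length - s) (0, 0)).1 else 0)
      (pvJump arr i s false) := by
  unfold pvJump
  by_cases hgt : i + s > arr.length - 1
  · rw [if_pos hgt, if_pos hgt]
  · rw [if_neg hgt, if_neg hgt]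
    by_cases h0 : arr.getD (i + s) 0 = 0
    · rw [if_pos h0, if_pos h0]
      have hlen := hc.1
      have hjlt : rows.length - s < rows.length := by omega
      rw [hc.2 _ hjlt, show arr.length - 1 - (rows.length - s) = i + s from by omega]
      exact pvF_mod_modeq arr (i + s) false
    · rw [if_neg h0, if_neg h0]

lemma pvBStep_spec (arr : List Int) (i : ℕ) (rows : List (Int × Int))
    (hi : i < arr.length - 1) (hc : pvCover arr (i + 1) rows) :
    pvCover arr i (pvBStep arr arr.length rows i) := by
  obtain ⟨hlen, hrows⟩ := hc
  simp only [pvBStep]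
  constructor
  · simp only [List.length_append, List.length_cons, List.length_nil]; omega
  · intro j hj
    simp only [List.length_append, List.length_cons, List.length_nil] at hj
    by_cases hjl : j < rows.length
    · rw [show ∀ x : Int × Int, ((rows ++ [x]).getD j ((0:Int),(0:Int))) = rows.getD j (0,0) from by
        intro x; simp [List.getD_eq_getElem?_getD, List.getElem?_append_left hjl]]
      exact hrows j hjl
    · have hje : j = rows.length := by omega
      subst hje
      rw [show ∀ x : Int × Int, ((rows ++ [x]).getD rows.length ((0:Int),(0:Int))) = x from by
        intro x; simp [List.getD_eq_getElem?_getD]]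
      rw [show arr.length - 1 - rows.length = i from by omega]
      have hcov : pvCover arr (i + 1) rows := ⟨hlen, hrows⟩
      unfold pvRow
      refine Prod.ext ?_ ?_
      · show PySem.Int.mod _ pvMOD = _
        rw [PySem.Int.mod_eq_emod_of_pos pvMOD_pos]
        simp only [List.foldl_cons, List.foldl_nil]
        rw [pv_if_add, pv_if_add, pv_if_add, zero_add]
        rw [pvF_eq arr i false hi]
        simp only [Bool.not_false, if_false]
        exact (((pvBTerm2 arr i 1 rows hi (by norm_num) hcov).add
          (pvBTerm2 arr i 3 rows hi (by norm_num) hcov)).add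
          (pvBTerm2 arr i 4 rows hi (by norm_num) hcov))
      · show PySem.Int.mod _ pvMOD = _
        rw [PySem.Int.mod_eq_emod_of_pos pvMOD_pos]
        simp only [List.foldl_cons, List.foldl_nil]
        rw [pv_if_add, pv_if_add, pv_if_add, zero_add]
        rw [pvF_eq arr i true hi]
        simp only [Bool.not_true, if_true]
        exact (((pvBTerm1 arr i 1 rows hi (by norm_num) hcov).add
          (pvBTerm1 arr i 2 rows hi (by norm_num) hcov)).add
          (pvBTerm1 arr i 4 rows hi (by norm_num) hcov))

lemma ratJump_alt_eq_F (arr : List Int) (h : arr ≠ []) : ratJump_alt arr = pvF arr 0 true % pvMOD := by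
  have hn : 0 < arr.length := List.length_pos_iff.2 h
  unfold ratJump_alt
  rw [if_neg h]
  have hinit : pvCover arr (arr.length - 1) [((1 : Int), (1 : Int))] := by
    refine ⟨by simp; omega, ?_⟩
    intro j hj
    simp only [List.length_cons, List.length_nil] at hj
    interval_cases j
    have h1 : arr.length - 1 ≤ arr.length - 1 - 0 := by omega
    simp only [List.getD, pvRow, Nat.sub_zero]
    rw [pvF_base arr _ _ le_rfl, pvF_base arr _ _ le_rfl]
    norm_num [pvMOD]
  have hfin := pv_foldl_revrange_inv (pvBStep arr arr.length) (pvCover arr) (arr.length - 1)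
    (fun k s hk hc => pvBStep_spec arr k s (by omega) hc) _ hinit
  obtain ⟨hlen, hrows⟩ := hfin
  show ((List.foldl (pvBStep arr arr.length) [((1:Int),(1:Int))] (List.range (arr.length - 1)).reverse).getD
    ((List.foldl (pvBStep arr arr.length) [((1:Int),(1:Int))] (List.range (arr.length - 1)).reverse).length - 1) (0,0)).2
    = pvF arr 0 true % pvMOD
  rw [hrows (
    ((List.range (arr.length - 1)).reverse.foldl (pvBStep arr arr.length) [((1:Int),(1:Int))]).length - 1)
    (by omega)]
  rw [show arr.length - 1 - (((List.range (arr.length - 1)).reverse.foldl (pvBStep arr arr.length) [((1:Int),(1:Int))]).length - 1) = 0 from by omega]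
  rfl

-- ===== VERDICT (by name: the statement is the Claim_ definition above) =====
theorem ratJump_spec : Claim_equal_ratJump := by
  intro arr _
  unfold Spec_ratJump
  by_cases h : arr = []
  · subst h; rfl
  · rw [ratJump_eq_F arr h, ratJump_alt_eq_F arr h]
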